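-- pv_equiv track=rewrite | github.com/zmelce/factcheck | factcheck_pipeline/publisherFR/sciencefeedback/sciencefeedback_article.py | cut_at_phrases
-- ===== SOURCE A (Python) =====
-- from typing import Tuple, List, Optional
--
-- def cut_at_phrases(text: str, phrases: List[str]) -> str:
--     if not text:
--         return ""
--     lower = text.lower()
--     cut_idx: Optional[int] = None
--     for phrase in phrases:
--         if not phrase:
--             continue
--         i = lower.find(phrase.lower())
--         if i != -1:
--             cut_idx = i if cut_idx is None else min(cut_idx, i)
--     return text[:cut_idx].strip() if cut_idx is not None else text
-- ===== SOURCE B (Python) =====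
-- from typing import List
--
-- def cut_at_phrases(text: str, phrases: List[str]) -> str:
--     # Position-major single scan: walk the text once and stop at the first
--     # position where any (lowered, non-empty) phrase starts.
--     if not text:
--         return ""
--     lower = text.lower()
--     pats = [p.lower() for p in phrases if p]
--     for i in range(len(lower)):
--         if any(lower.startswith(p, i) for p in pats):
--             return text[:i].strip()
--     return text
-- ===== Notes on version B (the rewrite author's own statement) =====
-- stated objective: alternative
-- what changed: Replaces the phrase-major pass (one full substring search per phrase, then a running min of the hit indices) by a position-major single left-to-right scan that stops at the first text position where any lowered phrase starts.
import Mathlib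
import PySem

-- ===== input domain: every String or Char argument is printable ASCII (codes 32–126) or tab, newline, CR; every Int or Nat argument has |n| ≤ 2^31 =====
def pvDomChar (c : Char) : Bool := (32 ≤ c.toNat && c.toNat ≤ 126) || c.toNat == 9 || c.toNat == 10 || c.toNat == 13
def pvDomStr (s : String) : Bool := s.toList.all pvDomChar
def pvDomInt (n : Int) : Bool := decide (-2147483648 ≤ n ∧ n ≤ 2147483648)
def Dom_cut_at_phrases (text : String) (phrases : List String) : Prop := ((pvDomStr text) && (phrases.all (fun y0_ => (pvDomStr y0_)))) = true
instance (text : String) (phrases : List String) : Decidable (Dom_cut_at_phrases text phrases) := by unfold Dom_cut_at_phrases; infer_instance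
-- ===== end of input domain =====

-- B replaces A's phrase-major pass (one full substring search per phrase, then a running
-- min of the hit indices) by a position-major single left-to-right scan that stops at the
-- first text position where any lowered non-empty phrase starts (objective: alternative).

-- ===== PORT A =====
-- A's loop body: skip empty phrases, find the lowered phrase, keep the running min.
def stepA (lower : String) (cut : Option Int) (phrase : String) : Option Int :=
  if phrase.toList = [] then cut
  else
    let i := PySem.Str.find lower (PySem.Str.lower phrase)
    if i ≠ -1 then
      some (match cut with
            | none => i
            | some c => min c i)
    else cut

def cut_at_phrases (text : String) (phrases : List String) : String :=
  if text.toList = [] then ""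
  else
    let lower := PySem.Str.lower text
    match phrases.foldl (stepA lower) none with
    | some c => PySem.Str.strip (String.ofList (PySem.List.slice text.toList none (some c)))
    | none => text

-- ===== PORT B =====
-- B's scan: first index of the lowered text at which some pattern starts (the for-i loop).
def scanPos (pats : List (List Char)) : List Char → Option Nat
  | [] => none
  | c :: rest =>
    if pats.any (fun p => p.isPrefixOf (c :: rest)) then some 0
    else (scanPos pats rest).map (· + 1)

def cut_at_phrases_alt (text : String) (phrases : List String) : String :=
  if text.toList = [] then ""
  else
    let lower := (PySem.Str.lower text).toList
    let pats := (phrases.filter (fun p => decide (p.toList ≠ []))).map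
                  (fun p => (PySem.Str.lower p).toList)
    match scanPos pats lower with
    | some i => PySem.Str.strip (String.ofList (text.toList.take i))
    | none => text

-- ===== PRECONDITION & SPEC =====
def Spec_cut_at_phrases (text : String) (phrases : List String) (out : String) : Prop := out = cut_at_phrases_alt text phrases
instance (text : String) (phrases : List String) (out : String) : Decidable (Spec_cut_at_phrases text phrases out) := by unfold Spec_cut_at_phrases; infer_instance

-- ===== CLAIM (what is proved, stated in full; the proofs are below) =====
def Claim_equal_cut_at_phrases : Prop := ∀ (text : String) (phrases : List String), Dom_cut_at_phrases text phrases → Spec_cut_at_phrases text phrases (cut_at_phrases text phrases)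

-- ===== LEMMAS AND PROOFS =====

-- "some non-empty phrase of the list, lowered, starts at position j of the lowered text"
def Matches (lower : String) (phrases : List String) (j : Nat) : Prop :=
  ∃ p ∈ phrases, p.toList ≠ [] ∧ PySem.Chars.lower p.toList <+: lower.toList.drop j

def optMin : Option Int → Option Int → Option Int
  | none, r => r
  | some c, none => some c
  | some c, some d => some (min c d)

lemma foldl_stepA_optMin (lower : String) (phrases : List String) :
    ∀ acc, phrases.foldl (stepA lower) acc = optMin acc (phrases.foldl (stepA lower) none) := by
  induction phrases with
  | nil => intro acc; cases acc <;> rfl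
  | cons p rest ih =>
    intro acc
    simp only [List.foldl_cons]
    rw [ih (stepA lower acc p), ih (stepA lower none p)]
    cases acc with
    | none => rfl
    | some c =>
      by_cases h1 : p.toList = []
      · simp [stepA, h1, optMin]
      · by_cases h2 : PySem.Chars.find lower.toList (PySem.Chars.lower p.toList) = -1
        · simp [stepA, h1, h2, optMin]
        · cases rest.foldl (stepA lower) none <;>
            simp [stepA, h1, h2, optMin, min_assoc]

lemma find_spec (s sub : List Char) (h : PySem.Chars.find s sub ≠ -1) :
    0 ≤ PySem.Chars.find s sub ∧ sub <+: s.drop (PySem.Chars.find s sub).toNat ∧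
      ∀ i < (PySem.Chars.find s sub).toNat, ¬ sub <+: s.drop i := by
  have h0 : ((0 : Nat) : Int) = (0 : Int) := rfl
  have := PySem.Chars.findFrom_natCast_spec s sub 0 (Nat.zero_le _)
  rw [h0, PySem.Chars.findFrom_zero] at this
  have h2 := this h
  exact ⟨h2.1, h2.2.1, fun i hi => h2.2.2 i (Nat.zero_le _) hi⟩

lemma no_prefix_of_not_infix (sub s : List Char) (h : ¬ sub <:+: s) :
    ∀ j, ¬ sub <+: s.drop j := by
  intro j hp
  exact h ((PySem.Chars.isIn_iff_infix sub s).mp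
    ((PySem.Chars.exists_prefix_drop_iff_isIn sub s).mp ⟨j, hp⟩))

-- A's fold computes the least position (as an Int) at which any non-empty phrase matches.
lemma bestA_spec (lower : String) (phrases : List String) :
    (phrases.foldl (stepA lower) none = none → ∀ j, ¬ Matches lower phrases j) ∧
    ∀ c, phrases.foldl (stepA lower) none = some c →
      0 ≤ c ∧ Matches lower phrases c.toNat ∧ ∀ j < c.toNat, ¬ Matches lower phrases j := by
  induction phrases with
  | nil =>
    constructor
    · intro _ j ⟨p, hp, _⟩; simp at hp
    · intro c hc; simp [List.foldl] at hc
  | cons p rest ih =>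
    have hsplit : (p :: rest).foldl (stepA lower) none
        = optMin (stepA lower none p) (rest.foldl (stepA lower) none) := by
      simp only [List.foldl_cons]
      exact foldl_stepA_optMin lower rest _
    by_cases h1 : p.toList = []
    · -- empty phrase: skipped, contributes nothing
      have hstep : stepA lower none p = none := by simp [stepA, h1]
      rw [hsplit, hstep]
      have hm : ∀ j, Matches lower (p :: rest) j ↔ Matches lower rest j := by
        intro j
        constructor
        · rintro ⟨q, hq, hne, hpre⟩
          rcases List.mem_cons.mp hq with rfl | hq'
          · exact absurd h1 hne
          · exact ⟨q, hq', hne, hpre⟩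
        · rintro ⟨q, hq, hne, hpre⟩; exact ⟨q, List.mem_cons_of_mem _ hq, hne, hpre⟩
      cases hr : rest.foldl (stepA lower) none with
      | none =>
        refine ⟨fun _ j hM => (ih.1 hr) j ((hm j).mp hM), fun c hc => by simp [optMin] at hc⟩
      | some d =>
        refine ⟨fun hcontra => by simp [optMin] at hcontra, fun c hc => ?_⟩
        simp [optMin] at hc; subst hc
        obtain ⟨hd0, hdM, hdmin⟩ := ih.2 d hr
        exact ⟨hd0, (hm _).mpr hdM, fun j hj hM => hdmin j hj ((hm j).mp hM)⟩
    · by_cases h2 : PySem.Chars.find lower.toList (PySem.Chars.lower p.toList) = -1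
      · -- phrase not found: contributes no match anywhere
        have hstep : stepA lower none p = none := by simp [stepA, h1, h2]
        have hnop : ∀ j, ¬ PySem.Chars.lower p.toList <+: lower.toList.drop j :=
          no_prefix_of_not_infix _ _ ((PySem.Chars.find_eq_neg_one_iff _ _).mp h2)
        have hm : ∀ j, Matches lower (p :: rest) j ↔ Matches lower rest j := by
          intro j
          constructor
          · rintro ⟨q, hq, hne, hpre⟩
            rcases List.mem_cons.mp hq with rfl | hq'
            · exact absurd hpre (hnop j)
            · exact ⟨q, hq', hne, hpre⟩
          · rintro ⟨q, hq, hne, hpre⟩; exact ⟨q, List.mem_cons_of_mem _ hq, hne, hpre⟩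
        rw [hsplit, hstep]
        cases hr : rest.foldl (stepA lower) none with
        | none =>
          refine ⟨fun _ j hM => (ih.1 hr) j ((hm j).mp hM), fun c hc => by simp [optMin] at hc⟩
        | some d =>
          refine ⟨fun hcontra => by simp [optMin] at hcontra, fun c hc => ?_⟩
          simp [optMin] at hc; subst hc
          obtain ⟨hd0, hdM, hdmin⟩ := ih.2 d hr
          exact ⟨hd0, (hm _).mpr hdM, fun j hj hM => hdmin j hj ((hm j).mp hM)⟩
      · -- phrase found at index f: the running min absorbs it
        set f := PySem.Chars.find lower.toList (PySem.Chars.lower p.toList) with hf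
        obtain ⟨hf0, hfpre, hfmin⟩ := find_spec _ _ h2
        have hstep : stepA lower none p = some f := by simp [stepA, h1, ← hf, h2]
        rw [hsplit, hstep]
        cases hr : rest.foldl (stepA lower) none with
        | none =>
          refine ⟨fun hcontra => by simp [optMin] at hcontra, fun c hc => ?_⟩
          simp [optMin] at hc; subst hc
          refine ⟨hf0, ⟨p, List.mem_cons_self, h1, hfpre⟩, ?_⟩
          intro j hj ⟨q, hq, hne, hpre⟩
          rcases List.mem_cons.mp hq with rfl | hq'
          · exact hfmin j hj hpre
          · exact (ih.1 hr) j ⟨q, hq', hne, hpre⟩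
        | some d =>
          refine ⟨fun hcontra => by simp [optMin] at hcontra, fun c hc => ?_⟩
          simp [optMin] at hc; subst hc
          obtain ⟨hd0, ⟨q0, hq0, hq0ne, hq0pre⟩, hdmin⟩ := ih.2 d hr
          have hmin0 : (0:Int) ≤ min f d := le_min hf0 hd0
          constructor
          · exact hmin0
          constructor
          · rcases le_total f d with hle | hle
            · have : (min f d).toNat = f.toNat := by omega
              rw [this]; exact ⟨p, List.mem_cons_self, h1, hfpre⟩
            · have : (min f d).toNat = d.toNat := by omega
              rw [this]; exact ⟨q0, List.mem_cons_of_mem _ hq0, hq0ne, hq0pre⟩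
          · intro j hj ⟨q, hq, hne, hpre⟩
            rcases List.mem_cons.mp hq with rfl | hq'
            · exact hfmin j (by omega) hpre
            · exact hdmin j (by omega) ⟨q, hq', hne, hpre⟩

lemma scanPos_none (pats : List (List Char)) (s : List Char)
    (hne : ∀ p ∈ pats, p ≠ []) (h : scanPos pats s = none) :
    ∀ j, ∀ p ∈ pats, ¬ p <+: s.drop j := by
  induction s with
  | nil =>
    intro j p hp hpre
    simp at hpre
    exact hne p hp hpre
  | cons c rest ih =>
    intro j p hp hpre
    simp only [scanPos] at h
    by_cases ha : pats.any (fun p => p.isPrefixOf (c :: rest)) = true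
    · simp [ha] at h
    · simp [ha] at h
      cases j with
      | zero =>
        exact ha (List.any_eq_true.mpr ⟨p, hp, List.isPrefixOf_iff_prefix.mpr (by simpa using hpre)⟩)
      | succ j' =>
        exact ih h j' p hp (by simpa using hpre)

lemma scanPos_some (pats : List (List Char)) (s : List Char) (i : Nat)
    (h : scanPos pats s = some i) :
    (∃ p ∈ pats, p <+: s.drop i) ∧ ∀ j < i, ∀ p ∈ pats, ¬ p <+: s.drop j := by
  induction s generalizing i with
  | nil => simp [scanPos] at h
  | cons c rest ih =>
    simp only [scanPos] at h
    by_cases ha : pats.any (fun p => p.isPrefixOf (c :: rest)) = true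
    · simp [ha] at h
      subst h
      obtain ⟨p, hp, hpre⟩ := List.any_eq_true.mp ha
      exact ⟨⟨p, hp, by simpa using List.isPrefixOf_iff_prefix.mp hpre⟩, by omega⟩
    · simp [ha] at h
      obtain ⟨i', hi', rfl⟩ := h
      obtain ⟨⟨p, hp, hpre⟩, hmin⟩ := ih i' hi'
      refine ⟨⟨p, hp, by simpa using hpre⟩, ?_⟩
      intro j hj q hq hqpre
      cases j with
      | zero =>
        exact ha (List.any_eq_true.mpr ⟨q, hq, List.isPrefixOf_iff_prefix.mpr (by simpa using hqpre)⟩)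
      | succ j' =>
        exact hmin j' (by omega) q hq (by simpa using hqpre)

-- ===== VERDICT (by name: the statement is the Claim_ definition above) =====
theorem cut_at_phrases_spec : Claim_equal_cut_at_phrases := by
  intro text phrases _
  unfold Spec_cut_at_phrases
  by_cases ht : text.toList = []
  · simp [cut_at_phrases, cut_at_phrases_alt, ht]
  · unfold cut_at_phrases cut_at_phrases_alt
    rw [if_neg ht, if_neg ht]
    have hmem : ∀ j, (∃ q ∈ (phrases.filter (fun p => decide (p.toList ≠ []))).map
            (fun p => (PySem.Str.lower p).toList),
          q <+: (PySem.Str.lower text).toList.drop j) ↔ Matches (PySem.Str.lower text) phrases j := by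
      intro j
      constructor
      · rintro ⟨q, hq, hpre⟩
        simp only [List.mem_map, List.mem_filter, decide_eq_true_eq] at hq
        obtain ⟨p, ⟨hp, hne⟩, rfl⟩ := hq
        exact ⟨p, hp, hne, by simpa [PySem.Str.toList_lower] using hpre⟩
      · rintro ⟨p, hp, hne, hpre⟩
        refine ⟨(PySem.Str.lower p).toList, ?_, by simpa [PySem.Str.toList_lower] using hpre⟩
        simp only [List.mem_map, List.mem_filter, decide_eq_true_eq]
        exact ⟨p, ⟨hp, hne⟩, rfl⟩
    have hpne : ∀ q ∈ (phrases.filter (fun p => decide (p.toList ≠ []))).map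
          (fun p => (PySem.Str.lower p).toList), q ≠ [] := by
      intro q hq
      simp only [List.mem_map, List.mem_filter, decide_eq_true_eq] at hq
      obtain ⟨p, ⟨_, hne⟩, rfl⟩ := hq
      simp [PySem.Str.toList_lower, PySem.Chars.lower, hne]
    obtain ⟨hAnone, hAsome⟩ := bestA_spec (PySem.Str.lower text) phrases
    cases hA : phrases.foldl (stepA (PySem.Str.lower text)) none with
    | none =>
      cases hB : scanPos ((phrases.filter (fun p => decide (p.toList ≠ []))).map
          (fun p => (PySem.Str.lower p).toList)) (PySem.Str.lower text).toList with
      | none => simp only [hA, hB]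
      | some i =>
        exfalso
        obtain ⟨hwit, _⟩ := scanPos_some _ _ _ hB
        exact (hAnone hA) i ((hmem i).mp hwit)
    | some c =>
      obtain ⟨hc0, hcM, hcmin⟩ := hAsome c hA
      cases hB : scanPos ((phrases.filter (fun p => decide (p.toList ≠ []))).map
          (fun p => (PySem.Str.lower p).toList)) (PySem.Str.lower text).toList with
      | none =>
        exfalso
        obtain ⟨q, hq, hqpre⟩ := (hmem c.toNat).mpr hcM
        exact scanPos_none _ _ hpne hB c.toNat q hq hqpre
      | some i =>
        obtain ⟨hwit, hBmin⟩ := scanPos_some _ _ _ hB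
        have hle1 : i ≤ c.toNat := by
          by_contra hlt
          obtain ⟨q, hq, hqpre⟩ := (hmem c.toNat).mpr hcM
          exact hBmin c.toNat (by omega) q hq hqpre
        have hle2 : c.toNat ≤ i := by
          by_contra hlt
          exact hcmin i (by omega) ((hmem i).mp hwit)
        have hci : c.toNat = i := by omega
        simp only [hA, hB]
        rw [PySem.List.slice_to text.toList hc0, hci]
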